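-- pv_equiv track=rewrite | github.com/VGrains/Heuristieken_project | codefiles/algoritmes/relax.py | calculate_collisions
-- ===== SOURCE A (Python) =====
-- def calculate_collisions(routes):
--     collisions = {}
--     for x in routes:
--         collisions[x] = 0
--         for y in routes[x]:
--             for i in routes:
--                 if y in routes[i]:
--                     collisions[x] += 1
--
--     collisions_sorted = {k: v for k, v in reversed(sorted(collisions.items(), key=lambda item: item[1]))}
--
--     return collisions_sorted
-- ===== SOURCE B (Python) =====
-- def calculate_collisions(routes):
--     # Count, for every node value, how many routes contain it (each route once).
--     containing = {}
--     for nodes in routes.values():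
--         for v in set(nodes):
--             containing[v] = containing.get(v, 0) + 1
--     # Per-route collision sum is a plain lookup-sum now.
--     collisions = {x: sum(containing.get(y, 0) for y in nodes) for x, nodes in routes.items()}
--     return {k: v for k, v in reversed(sorted(collisions.items(), key=lambda item: item[1]))}
-- ===== Notes on version B (the rewrite author's own statement) =====
-- stated objective: faster
-- what changed: Instead of A's triple nested loop (for each route, for each of its nodes, rescanning every route for membership), B builds a per-node route-containment counter dict in one pass over the routes and computes each route's collision count as a sum of lookups; the final value-sort + reverse is unchanged.
import Mathlib
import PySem

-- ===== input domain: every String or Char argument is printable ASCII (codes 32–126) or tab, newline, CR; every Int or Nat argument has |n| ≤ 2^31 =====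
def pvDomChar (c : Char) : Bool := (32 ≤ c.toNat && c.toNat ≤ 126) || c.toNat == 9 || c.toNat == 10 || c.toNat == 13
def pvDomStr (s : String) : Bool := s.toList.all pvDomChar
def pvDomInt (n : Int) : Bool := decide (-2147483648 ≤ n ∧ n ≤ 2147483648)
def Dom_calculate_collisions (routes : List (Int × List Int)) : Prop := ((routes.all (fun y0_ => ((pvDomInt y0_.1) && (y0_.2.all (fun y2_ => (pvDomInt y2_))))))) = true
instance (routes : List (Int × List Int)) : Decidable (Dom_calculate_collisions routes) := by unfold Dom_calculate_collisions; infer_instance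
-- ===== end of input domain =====

-- B replaces A's O(R^2*L^2) nested rescans with a per-node route-containment counter built once, then per-route lookup sums (asymptotically faster); same sort/reverse finish.


-- ===== PORT A =====
-- `for i in routes: if y in routes[i]: collisions[x] += 1`
def aInner (d : PySem.Dict Int (List Int)) (x : Int) (c : PySem.Dict Int Int) (y : Int) : PySem.Dict Int Int :=
  d.keys.foldl (fun c i => if (d.getD i []).contains y then c.modify x 0 (· + 1) else c) c

-- one outer iteration: `collisions[x] = 0; for y in routes[x]: …`
def aOuter (d : PySem.Dict Int (List Int)) (c : PySem.Dict Int Int) (x : Int) : PySem.Dict Int Int :=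
  (d.getD x []).foldl (aInner d x) (c.insert x 0)

def calculate_collisions (routes : List (Int × List Int)) : List (Int × Int) :=
  let d : PySem.Dict Int (List Int) := PySem.Dict.ofList routes
  let collisions : PySem.Dict Int Int := d.keys.foldl (aOuter d) PySem.Dict.empty
  (PySem.List.sorted collisions.items (fun p => p.2) false).reverse

-- ===== PORT B =====
-- `for nodes in routes.values(): for v in set(nodes): containing[v] = containing.get(v, 0) + 1`
def bCount (d : PySem.Dict Int (List Int)) : PySem.Dict Int Int :=
  d.values.foldl
    (fun m nodes => (PySem.Set.ofList nodes).foldl (fun m v => m.insert v (m.getD v 0 + 1)) m)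
    PySem.Dict.empty

def calculate_collisions_alt (routes : List (Int × List Int)) : List (Int × Int) :=
  let d : PySem.Dict Int (List Int) := PySem.Dict.ofList routes
  let containing := bCount d
  let collisions : List (Int × Int) :=
    d.items.map (fun p => (p.1, (p.2.map (fun y => containing.getD y 0)).sum))
  (PySem.List.sorted collisions (fun p => p.2) false).reverse

-- ===== PRECONDITION & SPEC =====
def Spec_calculate_collisions (routes : List (Int × List Int)) (out : List (Int × Int)) : Prop := out = calculate_collisions_alt routes
instance (routes : List (Int × List Int)) (out : List (Int × Int)) : Decidable (Spec_calculate_collisions routes out) := by unfold Spec_calculate_collisions; infer_instance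

-- ===== CLAIM (what is proved, stated in full; the proofs are below) =====
def Claim_equal_calculate_collisions : Prop := ∀ (routes : List (Int × List Int)), Dom_calculate_collisions routes → Spec_calculate_collisions routes (calculate_collisions routes)

-- ===== LEMMAS AND PROOFS =====

-- A's per-x collision total, read off the dict d
def aTotal (d : PySem.Dict Int (List Int)) (x : Int) : Int :=
  ((d.getD x []).map (fun y => ((d.keys.countP (fun i => (d.getD i []).contains y)) : Int))).sum

lemma inner_getD (q : Int → Bool) (x : Int) (l : List Int) : ∀ (c : PySem.Dict Int Int) (k : Int),
    ((l.foldl (fun c i => if q i then c.modify x 0 (· + 1) else c) c).getD k 0)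
      = c.getD k 0 + (if k = x then ((l.countP q : Nat) : Int) else 0) := by
  induction l with
  | nil => intro c k; simp
  | cons i t ih =>
      intro c k
      simp only [List.foldl_cons, ih, List.countP_cons]
      by_cases hq : q i
      · simp only [hq, if_true, PySem.Dict.getD_modify]
        by_cases hk : k = x <;> (simp [hk]; try ring)
      · simp [hq]

lemma inner_keys (q : Int → Bool) (x : Int) (l : List Int) : ∀ (c : PySem.Dict Int Int),
    c.contains x = true →
    (l.foldl (fun c i => if q i then c.modify x 0 (· + 1) else c) c).keys = c.keys := by
  induction l with
  | nil => intro c _; simp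
  | cons i t ih =>
      intro c hc
      simp only [List.foldl_cons]
      by_cases hq : q i
      · have hkeys : (c.modify x 0 (· + 1)).keys = c.keys := by
          rw [PySem.Dict.keys_modify, PySem.Dict.keys_insert_of_contains _ _ hc]
        have hc' : (c.modify x 0 (· + 1)).contains x = true := by
          rw [PySem.Dict.contains_iff_mem_keys, hkeys, ← PySem.Dict.contains_iff_mem_keys]
          exact hc
        simp only [hq, if_true, ih _ hc', hkeys]
      · rw [if_neg hq]; exact ih _ hc

lemma mid_getD (d : PySem.Dict Int (List Int)) (x : Int) (nodes : List Int) :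
    ∀ (c : PySem.Dict Int Int) (k : Int),
    ((nodes.foldl (aInner d x) c).getD k 0)
      = c.getD k 0 + (if k = x then (nodes.map (fun y => ((d.keys.countP (fun i => (d.getD i []).contains y)) : Int))).sum else 0) := by
  induction nodes with
  | nil => intro c k; simp
  | cons y t ih =>
      intro c k
      simp only [List.foldl_cons, ih, aInner, inner_getD, List.map_cons, List.sum_cons]
      by_cases hk : k = x <;> (simp [hk]; try ring)

lemma mid_keys (d : PySem.Dict Int (List Int)) (x : Int) (nodes : List Int) :
    ∀ (c : PySem.Dict Int Int), c.contains x = true →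
    (nodes.foldl (aInner d x) c).keys = c.keys := by
  induction nodes with
  | nil => intro c _; simp
  | cons y t ih =>
      intro c hc
      simp only [List.foldl_cons]
      have hkeys : (aInner d x c y).keys = c.keys := inner_keys _ x _ c hc
      have hc' : (aInner d x c y).contains x = true := by
        rw [PySem.Dict.contains_iff_mem_keys, hkeys, ← PySem.Dict.contains_iff_mem_keys]; exact hc
      rw [ih _ hc', hkeys]

lemma outer_keys (d : PySem.Dict Int (List Int)) (ks : List Int) :
    ∀ (c : PySem.Dict Int Int), (ks.foldl (aOuter d) c).keys = PySem.Set.update c.keys ks := by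
  induction ks with
  | nil => intro c; simp [PySem.Set.update_nil]
  | cons x t ih =>
      intro c
      simp only [List.foldl_cons, ih, PySem.Set.update_cons]
      congr 1
      have h1 : (aOuter d c x).keys = (c.insert x 0).keys :=
        mid_keys d x _ _ (PySem.Dict.contains_insert_self c x 0)
      rw [h1, PySem.Set.add_eq_ite]
      by_cases hc : c.contains x = true
      · rw [PySem.Dict.keys_insert_of_contains _ _ hc,
          if_pos ((PySem.Dict.contains_iff_mem_keys c x).mp hc)]
      · have hc' : c.contains x = false := by
          cases h : c.contains x
          · rfl
          · exact absurd h hc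
        rw [PySem.Dict.keys_insert_of_not_contains _ _ hc',
          if_neg (fun hm => hc ((PySem.Dict.contains_iff_mem_keys c x).mpr hm))]

lemma outer_getD (d : PySem.Dict Int (List Int)) (ks : List Int) :
    ∀ (c : PySem.Dict Int Int) (k : Int),
    (ks.foldl (aOuter d) c).getD k 0 = if k ∈ ks then aTotal d k else c.getD k 0 := by
  induction ks with
  | nil => intro c k; simp
  | cons x t ih =>
      intro c k
      simp only [List.foldl_cons, ih, List.mem_cons]
      by_cases ht : k ∈ t
      · simp [ht]
      · have haux : (aOuter d c x).getD k 0 = if k = x then aTotal d x else c.getD k 0 := by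
          simp only [aOuter, mid_getD, PySem.Dict.getD_insert, aTotal]
          by_cases hk : k = x <;> simp [hk]
        by_cases hk : k = x
        · subst hk; simp [ht, haux]
        · simp [ht, hk, haux]

lemma bCount_getD (d : PySem.Dict Int (List Int)) (y : Int) :
    (bCount d).getD y 0 = ((d.values.countP (fun ns => ns.contains y) : Nat) : Int) := by
  have main : ∀ (vs : List (List Int)) (m : PySem.Dict Int Int),
      ((vs.foldl (fun m nodes => (PySem.Set.ofList nodes).foldl (fun m v => m.insert v (m.getD v 0 + 1)) m) m).getD y 0)
        = m.getD y 0 + ((vs.countP (fun ns => ns.contains y) : Nat) : Int) := by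
    intro vs
    induction vs with
    | nil => intro m; simp
    | cons nodes t ih =>
        intro m
        simp only [List.foldl_cons, ih, PySem.Dict.getD_foldl_insert_add_one, List.countP_cons]
        have hcnt : (PySem.Set.ofList nodes).count y = if nodes.contains y = true then 1 else 0 := by
          by_cases hm : y ∈ nodes
          · rw [if_pos (by simpa using hm)]
            exact List.count_eq_one_of_mem (PySem.Set.nodup_ofList nodes) (by simpa [PySem.Set.mem_ofList] using hm)
          · rw [if_neg (by simpa using hm)]
            exact List.count_eq_zero_of_not_mem (by simpa [PySem.Set.mem_ofList] using hm)
        rw [hcnt]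
        push_cast
        split_ifs <;> ring
  simpa using main d.values PySem.Dict.empty

lemma countP_keys_eq_values (d : PySem.Dict Int (List Int)) (hnd : d.keys.Nodup) (y : Int) :
    d.keys.countP (fun i => (d.getD i []).contains y) = d.values.countP (fun ns => ns.contains y) := by
  simp only [PySem.Dict.keys, PySem.Dict.values, List.countP_map]
  apply List.countP_congr
  intro p hp
  have := PySem.Dict.getD_of_mem_items d (k := p.1) (v := p.2) (by simpa using hp) hnd []
  simp [Function.comp, this]

lemma collision_lists_eq (routes : List (Int × List Int)) :
    (((PySem.Dict.ofList routes : PySem.Dict Int (List Int)).keys.foldl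
        (aOuter (PySem.Dict.ofList routes)) PySem.Dict.empty).items)
      = (PySem.Dict.ofList routes : PySem.Dict Int (List Int)).items.map
          (fun p => (p.1, (p.2.map (fun y => (bCount (PySem.Dict.ofList routes)).getD y 0)).sum)) := by
  set d : PySem.Dict Int (List Int) := PySem.Dict.ofList routes with hd
  have hnd : d.keys.Nodup := PySem.Dict.nodup_keys_ofList routes
  set C : PySem.Dict Int Int := d.keys.foldl (aOuter d) PySem.Dict.empty with hC
  have hkeys : C.keys = d.keys := by
    rw [hC, outer_keys]
    simp only [PySem.Dict.keys_empty, PySem.Set.update_nil_left]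
    exact PySem.Set.ofList_eq_self_of_nodup _ hnd
  have hCnd : C.keys.Nodup := hkeys ▸ hnd
  rw [PySem.Dict.items_eq_map_keys C hCnd 0, hkeys,
      PySem.Dict.items_eq_map_keys d hnd [], List.map_map]
  apply List.map_congr_left
  intro k hk
  have hget : C.getD k 0 = aTotal d k := by
    rw [hC, outer_getD]; simp [hk]
  simp only [hget, Function.comp, aTotal]
  refine congrArg Prod.mk rfl ▸ congrArg (fun s => (k, s)) (congrArg List.sum (List.map_congr_left ?_))
  intro y _
  rw [bCount_getD, countP_keys_eq_values d hnd y]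

-- ===== VERDICT (by name: the statement is the Claim_ definition above) =====
theorem calculate_collisions_spec : Claim_equal_calculate_collisions := by
  intro routes _
  unfold Spec_calculate_collisions calculate_collisions calculate_collisions_alt
  simp only []
  rw [collision_lists_eq routes]
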